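-- pv_equiv track=rewrite | github.com/mitesh2205/code-with-mitesh | maximum_array_distance.py | maximum_array_distance
-- ===== SOURCE A (Python) =====
-- def maximum_array_distance(array):
--     output = 0
--     min_array = array[0][0]
--     max_array = array[0][-1]
--     for i in range(1, len(array)):
--         output = max(output, abs(array[i][0] - max_array), abs(array[i][-1] - min_array))
--         min_array = min(min_array, array[i][0])
--         max_array = max(max_array, array[i][-1])
--     return output
-- ===== SOURCE B (Python) =====
-- def maximum_array_distance(array):
--     # Divide and conquer over the tail: rec threads (mn, mx) left-to-right through
--     # the two halves and combines the halves' answers with max on the way up.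
--     def rec(mn, mx, rows):
--         if not rows:
--             return 0, mn, mx
--         if len(rows) == 1:
--             f = rows[0][0]
--             l = rows[0][-1]
--             return max(abs(f - mx), abs(l - mn)), min(mn, f), max(mx, l)
--         mid = len(rows) // 2
--         o1, mn1, mx1 = rec(mn, mx, rows[:mid])
--         o2, mn2, mx2 = rec(mn1, mx1, rows[mid:])
--         return max(o1, o2), mn2, mx2
--     out, _, _ = rec(array[0][0], array[0][-1], array[1:])
--     return out
-- ===== Notes on version B (the rewrite author's own statement) =====
-- stated objective: alternative
-- what changed: Replaces A's single linear scan with mutable running state by a divide-and-conquer recursion: the tail is split in half, each half is solved recursively (threading the running min/max through), and the halves' answers are combined with max on the way back up.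
import Mathlib
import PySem

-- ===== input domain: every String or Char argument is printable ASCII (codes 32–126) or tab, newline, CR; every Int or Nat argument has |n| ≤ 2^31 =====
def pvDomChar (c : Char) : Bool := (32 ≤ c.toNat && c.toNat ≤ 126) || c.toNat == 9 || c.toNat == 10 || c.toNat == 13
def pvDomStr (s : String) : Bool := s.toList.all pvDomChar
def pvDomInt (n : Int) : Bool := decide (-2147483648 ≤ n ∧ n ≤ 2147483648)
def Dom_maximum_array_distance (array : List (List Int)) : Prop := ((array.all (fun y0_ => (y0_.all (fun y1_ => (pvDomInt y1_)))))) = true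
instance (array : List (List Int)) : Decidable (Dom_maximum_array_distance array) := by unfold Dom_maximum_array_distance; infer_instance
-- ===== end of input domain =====

-- B replaces A's single linear scan by a divide-and-conquer recursion that splits the tail
-- in half, threads the running min/max through the halves, and combines answers by max
-- on the way up (alternative decomposition, same comparisons).


-- ===== PORT A =====
def maximum_array_distance (array : List (List Int)) : Int :=
  let output : Int := 0
  let min_array := PySem.List.pyGetD (PySem.List.pyGetD array 0 []) 0 0
  let max_array := PySem.List.pyGetD (PySem.List.pyGetD array 0 []) (-1) 0
  let s := (PySem.List.pyRange 1 (array.length : Int) 1).foldl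
    (fun (st : Int × Int × Int) i =>
      (fun (st : Int × Int × Int) (row : List Int) =>
        (max st.1 (max |PySem.List.pyGetD row 0 0 - st.2.2| |PySem.List.pyGetD row (-1) 0 - st.2.1|),
         min st.2.1 (PySem.List.pyGetD row 0 0),
         max st.2.2 (PySem.List.pyGetD row (-1) 0))) st (PySem.List.pyGetD array i []))
    (output, min_array, max_array)
  s.1

-- ===== PORT B =====
-- the inner divide-and-conquer helper rec(mn, mx, rows); len(rows)//2 for a nonnegative
-- length is Nat division, ported as rows.length / 2; rows[:mid]/rows[mid:] are take/drop
def pvRec (mn mx : Int) (rows : List (List Int)) : Int × Int × Int :=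
  match rows with
  | [] => (0, mn, mx)
  | [r] =>
    let f := PySem.List.pyGetD r 0 0
    let l := PySem.List.pyGetD r (-1) 0
    (max |f - mx| |l - mn|, min mn f, max mx l)
  | r1 :: r2 :: rs =>
    let mid := (r1 :: r2 :: rs).length / 2
    let s1 := pvRec mn mx ((r1 :: r2 :: rs).take mid)
    let s2 := pvRec s1.2.1 s1.2.2 ((r1 :: r2 :: rs).drop mid)
    (max s1.1 s2.1, s2.2.1, s2.2.2)
  termination_by rows.length
  decreasing_by
    · simp only [List.length_take, List.length_cons]; omega
    · simp only [List.length_drop, List.length_cons]; omega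

def maximum_array_distance_alt (array : List (List Int)) : Int :=
  let mn0 := PySem.List.pyGetD (PySem.List.pyGetD array 0 []) 0 0
  let mx0 := PySem.List.pyGetD (PySem.List.pyGetD array 0 []) (-1) 0
  (pvRec mn0 mx0 (array.drop 1)).1

-- ===== PRECONDITION & SPEC =====
-- Python A raises IndexError on an empty outer list (array[0]) and on any empty row
-- (row[0]/row[-1]); exactly those inputs are excluded.
def Pre_maximum_array_distance (array : List (List Int)) : Prop :=
  array ≠ [] ∧ ∀ row ∈ array, row ≠ []
instance (array : List (List Int)) : Decidable (Pre_maximum_array_distance array) := by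
  unfold Pre_maximum_array_distance; infer_instance
def pvWitness_maximum_array_distance : List (List Int) := [[1, 2], [10, -3]]

def Spec_maximum_array_distance (array : List (List Int)) (out : Int) : Prop := out = maximum_array_distance_alt array
instance (array : List (List Int)) (out : Int) : Decidable (Spec_maximum_array_distance array out) := by unfold Spec_maximum_array_distance; infer_instance

-- ===== CLAIM (what is proved, stated in full; the proofs are below) =====
def Claim_equal_maximum_array_distance : Prop := ∀ (array : List (List Int)), Dom_maximum_array_distance array → Pre_maximum_array_distance array → Spec_maximum_array_distance array (maximum_array_distance array)

-- ===== LEMMAS AND PROOFS =====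

-- B's result is never negative (it is a max of 0's and absolute values).
lemma pvRec_nonneg (mn mx : Int) (rows : List (List Int)) : 0 ≤ (pvRec mn mx rows).1 := by
  induction mn, mx, rows using pvRec.induct with
  | case1 mn mx => simp [pvRec]
  | case2 mn mx r => simp [pvRec]
  | case3 mn mx r1 r2 rs mid s1 ih1 ih1' ih2 =>
    simp only [pvRec]
    exact le_max_of_le_left ih1

-- A's left fold over the tail rows is B's divide-and-conquer with the running output
-- max-merged in, provided the running output is nonnegative.
lemma pvRec_fold (mn mx : Int) (rows : List (List Int)) : ∀ (out : Int), 0 ≤ out →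
    rows.foldl (fun (st : Int × Int × Int) (row : List Int) =>
        (max st.1 (max |PySem.List.pyGetD row 0 0 - st.2.2| |PySem.List.pyGetD row (-1) 0 - st.2.1|),
         min st.2.1 (PySem.List.pyGetD row 0 0),
         max st.2.2 (PySem.List.pyGetD row (-1) 0))) (out, mn, mx)
      = (max out (pvRec mn mx rows).1, (pvRec mn mx rows).2.1, (pvRec mn mx rows).2.2) := by
  induction mn, mx, rows using pvRec.induct with
  | case1 mn mx => intro out h; simp [pvRec, max_eq_left h]
  | case2 mn mx r =>
    intro out h
    simp [pvRec]

  | case3 mn mx r1 r2 rs mid s1 ih1 ih1' ih2 =>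
    intro out h
    have hsplit : (r1 :: r2 :: rs) = (r1 :: r2 :: rs).take mid ++ (r1 :: r2 :: rs).drop mid :=
      (List.take_append_drop mid _).symm
    rw [hsplit, List.foldl_append, ih1 out h]
    have h1 : 0 ≤ max out (pvRec mn mx ((r1 :: r2 :: rs).take mid)).1 := le_max_of_le_left h
    rw [ih2 _ h1, ← hsplit]
    have e1 : (r1 :: r2 :: rs).length / 2 = mid := rfl
    have e2 : pvRec mn mx (List.take mid (r1 :: r2 :: rs)) = s1 := rfl
    simp only [pvRec, e1, e2]
    simp [max_assoc]

-- ===== VERDICT (by name: the statement is the Claim_ definition above) =====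
theorem maximum_array_distance_spec : Claim_equal_maximum_array_distance := by
  intro array _ hpre
  unfold Spec_maximum_array_distance
  simp only [maximum_array_distance, maximum_array_distance_alt]
  rw [PySem.List.foldl_pyRange_pyGetD' array []
    (fun (st : Int × Int × Int) (row : List Int) =>
      (max st.1 (max |PySem.List.pyGetD row 0 0 - st.2.2| |PySem.List.pyGetD row (-1) 0 - st.2.1|),
       min st.2.1 (PySem.List.pyGetD row 0 0),
       max st.2.2 (PySem.List.pyGetD row (-1) 0))) _ (by norm_num)]
  rw [show (1 : Int).toNat = 1 from rfl]
  rw [pvRec_fold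
    (PySem.List.pyGetD (PySem.List.pyGetD array 0 []) 0 0)
    (PySem.List.pyGetD (PySem.List.pyGetD array 0 []) (-1) 0) (array.drop 1) 0 le_rfl]
  simp [max_eq_right (pvRec_nonneg _ _ _)]
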